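-- pv_equiv track=rewrite | github.com/sabith-th/algorithms-data-structures-edx | Algorithm Design/Alogirthmic Warmup/fibonacci_partial_sum.py | get_fibonacci_diff
-- ===== SOURCE A (Python) =====
-- def get_fibonacci_diff(m, n):
--     k = max(m, n)
--     arr = [0, 1]
--     for x in range(2, k + 1):
--         arr.append(arr[x - 1] + arr[x - 2])
--     if (m > n):
--         diff = arr[m] - arr[n]
--     else:
--         diff = arr[n] - arr[m - 1]
--     return diff % 10
-- ===== SOURCE B (Python) =====
-- # Pisano-period version: F(i) mod 10 repeats with period 60, so the answer
-- # is read off a fixed 60-entry table in O(1) instead of building fib up to max(m, n).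
-- _FIB10 = []
-- _a, _b = 0, 1
-- for _ in range(60):
--     _FIB10.append(_a)
--     _a, _b = _b, (_a + _b) % 10
--
--
-- def get_fibonacci_diff(m, n):
--     if m > n:
--         return (_FIB10[m % 60] - _FIB10[n % 60]) % 10
--     return (_FIB10[n % 60] - _FIB10[(m - 1) % 60]) % 10
-- ===== Notes on version B (the rewrite author's own statement) =====
-- stated objective: faster
-- what changed: B replaces A's O(k) construction of the full big-integer Fibonacci list up to max(m,n) with a fixed 60-entry table of Fibonacci last digits (Pisano period of 10) and reads the two needed digits off it in O(1).
-- intended difference: For -n <= m <= 0 <= n, A returns (F(n) - F(n+m)) % 10 because arr[m-1] wraps around via Python's negative indexing to an unrelated entry, while B returns (F(n) - F(m-1)) % 10 using the negafibonacci value of F(m-1), which is what the formula 'last digit of F(n) - F(m-1)' intends. — e.g. on get_fibonacci_diff(0, 5): A returns 0, B returns 4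
-- outside the precondition, e.g. on get_fibonacci_diff(5, -1): A returns 0, B returns 4
import Mathlib
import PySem

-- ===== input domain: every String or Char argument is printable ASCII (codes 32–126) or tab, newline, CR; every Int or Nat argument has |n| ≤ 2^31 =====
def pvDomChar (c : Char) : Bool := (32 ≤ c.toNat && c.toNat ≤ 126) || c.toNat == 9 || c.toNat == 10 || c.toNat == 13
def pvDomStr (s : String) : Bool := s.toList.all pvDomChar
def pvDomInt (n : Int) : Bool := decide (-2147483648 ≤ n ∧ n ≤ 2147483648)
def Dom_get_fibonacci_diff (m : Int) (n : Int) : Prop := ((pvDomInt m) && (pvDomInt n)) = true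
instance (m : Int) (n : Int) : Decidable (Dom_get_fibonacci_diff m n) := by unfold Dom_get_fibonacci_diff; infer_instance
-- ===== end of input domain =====

-- B replaces A's O(k) big-integer Fibonacci table with a fixed 60-entry Pisano-period
-- table of last digits, answering in O(1).


-- ===== PORT A =====
-- arr = [0, 1]; for x in range(2, k + 1): arr.append(arr[x-1] + arr[x-2])
def pvFibArrA (k : Int) : List Int :=
  (PySem.List.pyRange 2 (k + 1) 1).foldl
    (fun arr x => arr ++ [PySem.List.pyGetD arr (x - 1) 0 + PySem.List.pyGetD arr (x - 2) 0])
    [0, 1]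

def get_fibonacci_diff (m : Int) (n : Int) : Int :=
  let k := max m n
  let arr := pvFibArrA k
  let diff := if m > n then PySem.List.pyGetD arr m 0 - PySem.List.pyGetD arr n 0
              else PySem.List.pyGetD arr n 0 - PySem.List.pyGetD arr (m - 1) 0
  PySem.Int.mod diff 10

-- ===== PORT B =====
-- _FIB10: the 60 last digits of F(0)..F(59) (Pisano period of 10)
def pvFib10Table : List Int :=
  ((List.range 60).foldl
    (fun (st : List Int × Int × Int) _ =>
      (st.1 ++ [st.2.1], st.2.2, PySem.Int.mod (st.2.1 + st.2.2) 10))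
    ([], 0, 1)).1

def pvFib10 (i : Int) : Int := PySem.List.pyGetD pvFib10Table (PySem.Int.mod i 60) 0

def get_fibonacci_diff_alt (m : Int) (n : Int) : Int :=
  if m > n then PySem.Int.mod (pvFib10 m - pvFib10 n) 10
  else PySem.Int.mod (pvFib10 n - pvFib10 (m - 1)) 10

-- ===== PRECONDITION & SPEC =====
-- Pre_ excludes n < 0, where A raises IndexError or returns an accidental
-- negative-index wraparound value for an index outside the function's Fibonacci
-- domain, and m < -n, where A raises IndexError (arr[m-1] out of range).
def Pre_get_fibonacci_diff (m : Int) (n : Int) : Prop := 0 ≤ n ∧ -n ≤ m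
instance (m : Int) (n : Int) : Decidable (Pre_get_fibonacci_diff m n) := by
  unfold Pre_get_fibonacci_diff; infer_instance

def pvWitness_get_fibonacci_diff : Int × Int := (3, 7)

-- On -n ≤ m ≤ 0 ≤ n, A returns (F(n) - F(n+m)) % 10 because arr[m-1] wraps around to
-- an unrelated entry; B returns (F(n) - F(m-1)) % 10 with the negafibonacci value of
-- F(m-1), which is what the formula 'last digit of F(n) - F(m-1)' intends.
def D_get_fibonacci_diff (m : Int) (n : Int) : Prop := -n ≤ m ∧ m ≤ 0 ∧ 0 ≤ n
instance (m : Int) (n : Int) : Decidable (D_get_fibonacci_diff m n) := by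
  unfold D_get_fibonacci_diff; infer_instance

def Spec_get_fibonacci_diff (m : Int) (n : Int) (out : Int) : Prop :=
  ¬ D_get_fibonacci_diff m n → out = get_fibonacci_diff_alt m n
instance (m : Int) (n : Int) (out : Int) : Decidable (Spec_get_fibonacci_diff m n out) := by
  unfold Spec_get_fibonacci_diff; infer_instance

def pvDiffWitness_get_fibonacci_diff : Int × Int := (0, 5)
def pvDiffWitnessOut_get_fibonacci_diff : Int × Int := (0, 4)

-- ===== CLAIM (what is proved, stated in full; the proofs are below) =====
def Claim_unchanged_get_fibonacci_diff : Prop := ∀ (m : Int) (n : Int), Dom_get_fibonacci_diff m n → Pre_get_fibonacci_diff m n → Spec_get_fibonacci_diff m n (get_fibonacci_diff m n)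
def Claim_changed_get_fibonacci_diff : Prop := Dom_get_fibonacci_diff (pvDiffWitness_get_fibonacci_diff.1) (pvDiffWitness_get_fibonacci_diff.2) ∧ Pre_get_fibonacci_diff (pvDiffWitness_get_fibonacci_diff.1) (pvDiffWitness_get_fibonacci_diff.2) ∧ D_get_fibonacci_diff (pvDiffWitness_get_fibonacci_diff.1) (pvDiffWitness_get_fibonacci_diff.2) ∧ get_fibonacci_diff (pvDiffWitness_get_fibonacci_diff.1) (pvDiffWitness_get_fibonacci_diff.2) = pvDiffWitnessOut_get_fibonacci_diff.1 ∧ get_fibonacci_diff_alt (pvDiffWitness_get_fibonacci_diff.1) (pvDiffWitness_get_fibonacci_diff.2) = pvDiffWitnessOut_get_fibonacci_diff.2 ∧ pvDiffWitnessOut_get_fibonacci_diff.1 ≠ pvDiffWitnessOut_get_fibonacci_diff.2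

-- ===== LEMMAS AND PROOFS =====

theorem pvFibArrA_eq (k : Nat) (hk : 1 ≤ k) :
    pvFibArrA (k : Int) = (List.range (k + 1)).map (fun i => (Nat.fib i : Int)) := by
  induction k with
  | zero => omega
  | succ k ih =>
    rcases Nat.eq_or_lt_of_le hk with h1 | h1
    · simp [pvFibArrA, ← h1]
      decide
    · have hk1 : 1 ≤ k := by omega
      have hsplit : PySem.List.pyRange 2 ((k : Int) + 1 + 1) 1
          = PySem.List.pyRange 2 ((k : Int) + 1) 1 ++ [(k : Int) + 1] :=
        PySem.List.pyRange_one_succ_right (by omega)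
      have harr : pvFibArrA ((k + 1 : Nat) : Int)
          = pvFibArrA (k : Int) ++ [PySem.List.pyGetD (pvFibArrA k) ((k : Nat) : Int) 0
              + PySem.List.pyGetD (pvFibArrA k) ((k - 1 : Nat) : Int) 0] := by
        have e1 : ((k : Int) + 1 - 1) = ((k : Nat) : Int) := by ring
        have e2 : ((k : Int) + 1 - 2) = ((k - 1 : Nat) : Int) := by omega
        have ec : (((k + 1 : Nat) : Int) + 1) = ((k : Int) + 1 + 1) := by push_cast; ring
        simp only [pvFibArrA, ec, hsplit, List.foldl_append, List.foldl_cons, List.foldl_nil,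
          e1, e2]
      rw [harr, ih hk1]
      rw [PySem.List.pyGetD_natCast, PySem.List.pyGetD_natCast,
        PySem.List.getD_map_range _ _ _ _ (by omega), PySem.List.getD_map_range _ _ _ _ (by omega)]
      rw [List.range_succ (n := k + 1)]
      have : Nat.fib k + Nat.fib (k - 1) = Nat.fib (k + 1) := by
        have h2 : k - 1 + 2 = k + 1 := by omega
        have := Nat.fib_add_two (n := k - 1)
        rw [h2] at this
        rw [this, Nat.sub_add_cancel hk1]
        ring
      simp [← this]

theorem pvFibMod10_pair (i : Nat) :
    Nat.fib (i + 60) % 10 = Nat.fib i % 10 ∧ Nat.fib (i + 61) % 10 = Nat.fib (i + 1) % 10 := by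
  induction i with
  | zero => decide
  | succ k ih =>
    refine ⟨ih.2, ?_⟩
    have e1 : k + 1 + 61 = (k + 60) + 2 := by ring
    have e2 : k + 1 + 1 = k + 2 := by ring
    rw [e1, e2, Nat.fib_add_two (n := k + 60), Nat.fib_add_two (n := k)]
    have e3 : k + 60 + 1 = k + 61 := by ring
    rw [e3, Nat.add_mod, ih.1, ih.2, ← Nat.add_mod]

theorem pvFibMod10_period (i : Nat) : Nat.fib i % 10 = Nat.fib (i % 60) % 10 := by
  have key : ∀ q r : Nat, Nat.fib (60 * q + r) % 10 = Nat.fib r % 10 := by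
    intro q
    induction q with
    | zero => intro r; simp
    | succ p ih =>
      intro r
      have e : 60 * (p + 1) + r = (60 * p + r) + 60 := by ring
      rw [e, (pvFibMod10_pair (60 * p + r)).1, ih]
  have := key (i / 60) (i % 60)
  rwa [Nat.div_add_mod] at this

theorem pvFib10Table_eq :
    pvFib10Table = (List.range 60).map (fun j => ((Nat.fib j % 10 : Nat) : Int)) := by
  decide

theorem pvFib10_natCast (a : Nat) : pvFib10 (a : Int) = ((Nat.fib a % 10 : Nat) : Int) := by
  rw [pvFib10, show (60 : Int) = ((60 : Nat) : Int) by norm_num, PySem.Int.mod_natCast, PySem.List.pyGetD_natCast, pvFib10Table_eq,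
    PySem.List.getD_map_range _ _ _ _ (Nat.mod_lt a (by omega)), ← pvFibMod10_period]

theorem pvAgree_of_pos (m n : Int) (hn : 0 ≤ n) (hm : 1 ≤ m) :
    get_fibonacci_diff m n = get_fibonacci_diff_alt m n := by
  obtain ⟨M, rfl⟩ : ∃ M : Nat, m = (M : Int) := ⟨m.toNat, (Int.toNat_of_nonneg (by omega)).symm⟩
  obtain ⟨N, rfl⟩ : ∃ N : Nat, n = (N : Int) := ⟨n.toNat, (Int.toNat_of_nonneg hn).symm⟩
  have hM : 1 ≤ M := by exact_mod_cast hm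
  have hmax : max (M : Int) (N : Int) = ((max M N : Nat) : Int) := by
    rw [Nat.cast_max]
  have harr := pvFibArrA_eq (max M N) (le_trans hM (le_max_left _ _))
  have e2 : ((M : Int) - 1) = ((M - 1 : Nat) : Int) := by omega
  simp only [get_fibonacci_diff, get_fibonacci_diff_alt, hmax, harr, e2]
  by_cases hgt : (N : Int) < (M : Int)
  · simp only [if_pos hgt]
    rw [PySem.List.pyGetD_natCast, PySem.List.pyGetD_natCast,
      PySem.List.getD_map_range _ _ _ _ (by omega),
      PySem.List.getD_map_range _ _ _ _ (by have := Nat.le_max_right M N; omega),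
      pvFib10_natCast, pvFib10_natCast,
      PySem.Int.mod_eq_emod_of_pos (by norm_num), PySem.Int.mod_eq_emod_of_pos (by norm_num)]
    push_cast
    omega
  · simp only [if_neg hgt]
    rw [PySem.List.pyGetD_natCast, PySem.List.pyGetD_natCast,
      PySem.List.getD_map_range _ _ _ _ (by have := Nat.le_max_right M N; omega),
      PySem.List.getD_map_range _ _ _ _ (by have := Nat.le_max_left M N; omega),
      pvFib10_natCast, pvFib10_natCast,
      PySem.Int.mod_eq_emod_of_pos (by norm_num), PySem.Int.mod_eq_emod_of_pos (by norm_num)]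
    push_cast
    omega

-- ===== VERDICT (by name: the statement is the Claim_ definition above) =====
theorem get_fibonacci_diff_spec : Claim_unchanged_get_fibonacci_diff := by
  intro m n _ hpre
  unfold Spec_get_fibonacci_diff
  intro hnd
  obtain ⟨hn, hmn⟩ := hpre
  have hm : 1 ≤ m := by
    by_contra h
    exact hnd ⟨hmn, by omega, hn⟩
  exact pvAgree_of_pos m n hn hm

theorem get_fibonacci_diff_changed : Claim_changed_get_fibonacci_diff := by
  unfold Claim_changed_get_fibonacci_diff; decide
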